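-- pv_equiv track=rewrite | github.com/RianKatoen/AdventOfCode2022 | day08/puzzle.py | visible_trees_in_line
-- ===== SOURCE A (Python) =====
-- def visible_trees_in_line(grid: list[int]):
--     i, max_height, trees = 1, grid[0], [0]
--     while i < len(grid):
--         if grid[i] > max_height:
--             trees.append(i)
--         max_height = max(max_height, grid[i])
--         i += 1
--     return trees
-- ===== SOURCE B (Python) =====
-- def visible_trees_in_line(grid: list[int]):
--     prefix_max = [grid[0]]
--     for h in grid[1:]:
--         prefix_max.append(prefix_max[-1] if prefix_max[-1] >= h else h)
--     return [0] + [i for i in range(1, len(grid)) if grid[i] > prefix_max[i - 1]]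
-- ===== Notes on version B (the rewrite author's own statement) =====
-- stated objective: alternative
-- what changed: Replaces the single running-max while-loop over indices with two passes: build a prefix-maximum table by folding over the values, then emit the result as a filter of the indices whose tree exceeds the previous prefix maximum (a list comprehension instead of repeated appends).
import Mathlib
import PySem

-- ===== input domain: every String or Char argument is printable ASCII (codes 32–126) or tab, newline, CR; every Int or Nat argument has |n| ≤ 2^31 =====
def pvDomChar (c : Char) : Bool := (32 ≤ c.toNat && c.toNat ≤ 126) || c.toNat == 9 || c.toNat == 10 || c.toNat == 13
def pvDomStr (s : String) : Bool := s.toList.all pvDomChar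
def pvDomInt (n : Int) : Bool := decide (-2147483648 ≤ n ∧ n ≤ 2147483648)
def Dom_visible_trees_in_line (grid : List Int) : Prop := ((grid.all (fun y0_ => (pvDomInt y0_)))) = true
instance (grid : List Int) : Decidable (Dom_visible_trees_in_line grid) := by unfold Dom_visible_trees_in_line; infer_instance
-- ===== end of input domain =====

-- B replaces A's single running-max while-loop with two passes (build a prefix-maximum
-- table, then filter indices against it); same cost, different decomposition.

-- ===== PORT A =====
-- while-loop body: append i if grid[i] > max_height, then update max_height
def vtStepA (grid : List Int) (st : Int × List Int) (i : Int) : Int × List Int :=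
  let gi := (PySem.List.pyGet? grid i).getD 0
  let trees := if gi > st.1 then st.2 ++ [i] else st.2
  (max st.1 gi, trees)

def visible_trees_in_line (grid : List Int) : List Int :=
  match PySem.List.pyGet? grid 0 with
  | none => []   -- grid[0] raises IndexError; excluded by Pre_
  | some g0 => (List.foldl (vtStepA grid) (g0, [0]) (PySem.List.pyRange 1 grid.length 1)).2

-- ===== PORT B =====
-- for-loop body: prefix_max.append(prefix_max[-1] if prefix_max[-1] >= h else h)
def vtStepB (pm : List Int) (h : Int) : List Int :=
  let last := (PySem.List.pyGet? pm (-1)).getD 0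
  pm ++ [if last ≥ h then last else h]

def visible_trees_in_line_alt (grid : List Int) : List Int :=
  match PySem.List.pyGet? grid 0 with
  | none => []   -- grid[0] raises IndexError; excluded by Pre_
  | some g0 =>
    let pm := List.foldl vtStepB [g0] (PySem.List.slice grid (some 1) none)
    [0] ++ (PySem.List.pyRange 1 grid.length 1).filter
        (fun i => decide ((PySem.List.pyGet? pm (i - 1)).getD 0 < (PySem.List.pyGet? grid i).getD 0))

-- ===== PRECONDITION & SPEC =====
-- A evaluates grid[0], which raises IndexError on the empty list; Pre_ excludes only that.
def Pre_visible_trees_in_line (grid : List Int) : Prop := grid ≠ []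
instance (grid : List Int) : Decidable (Pre_visible_trees_in_line grid) := by
  unfold Pre_visible_trees_in_line; infer_instance

def pvWitness_visible_trees_in_line : List Int := [3, 1, 4, 4, 5]

def Spec_visible_trees_in_line (grid : List Int) (out : List Int) : Prop := out = visible_trees_in_line_alt grid
instance (grid : List Int) (out : List Int) : Decidable (Spec_visible_trees_in_line grid out) := by unfold Spec_visible_trees_in_line; infer_instance

-- ===== CLAIM (what is proved, stated in full; the proofs are below) =====
def Claim_equal_visible_trees_in_line : Prop := ∀ (grid : List Int), Dom_visible_trees_in_line grid → Pre_visible_trees_in_line grid → Spec_visible_trees_in_line grid (visible_trees_in_line grid)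

-- ===== LEMMAS AND PROOFS =====

-- the indices A appends, as a function of the current max and remaining index list
def collect (grid : List Int) : Int → List Int → List Int
  | _, [] => []
  | mh, i :: L =>
      let gi := (PySem.List.pyGet? grid i).getD 0
      (if gi > mh then [i] else []) ++ collect grid (max mh gi) L

theorem foldA_eq_collect (grid : List Int) (L : List Int) :
    ∀ (mh : Int) (trees : List Int),
      (List.foldl (vtStepA grid) (mh, trees) L).2 = trees ++ collect grid mh L := by
  induction L with
  | nil => intro mh trees; simp [collect]
  | cons i L ih =>
      intro mh trees
      simp only [List.foldl_cons, vtStepA, collect, ih]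
      split_ifs <;> simp

-- the tail of the prefix-max table built from running max m over l
def pmTail (m : Int) : List Int → List Int
  | [] => []
  | h :: l => (max m h) :: pmTail (max m h) l

theorem vtStepB_eq (pm : List Int) (x : Int) (h : Int) :
    vtStepB (pm ++ [x]) h = (pm ++ [x]) ++ [max x h] := by
  simp only [vtStepB, PySem.List.pyGet?_neg_one_append_singleton, Option.getD_some]
  have hx : (if x ≥ h then x else h) = max x h := by rw [max_def]; split_ifs <;> omega
  rw [hx]

theorem foldB_eq_pmTail (l : List Int) :
    ∀ (pm : List Int) (x : Int),
      List.foldl vtStepB (pm ++ [x]) l = (pm ++ [x]) ++ pmTail x l := by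
  induction l with
  | nil => intro pm x; simp [pmTail]
  | cons h l ih =>
      intro pm x
      simp only [List.foldl_cons, vtStepB_eq, pmTail]
      rw [ih (pm ++ [x]) (max x h)]
      simp

-- running max of m and the first k elements of l
def rmax (m : Int) : List Int → Nat → Int
  | _, 0 => m
  | [], _ + 1 => m
  | h :: l, k + 1 => rmax (max m h) l k

theorem rmax_succ (l : List Int) : ∀ (m : Int) (k : Nat), k < l.length →
    rmax m l (k + 1) = max (rmax m l k) l[k]! := by
  induction l with
  | nil => intro m k hk; simp at hk
  | cons h l ih =>
      intro m k hk
      cases k with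
      | zero => simp [rmax]
      | succ k =>
          have := ih (max m h) k (by simpa using hk)
          simp only [rmax, this]
          congr 1

theorem pmTail_getElem? (l : List Int) : ∀ (m : Int) (k : Nat), k < l.length →
    (pmTail m l)[k]? = some (rmax m l (k + 1)) := by
  induction l with
  | nil => intro m k hk; simp at hk
  | cons h l ih =>
      intro m k hk
      cases k with
      | zero => simp [pmTail, rmax]
      | succ k =>
          simp only [pmTail, List.getElem?_cons_succ, rmax]
          exact ih (max m h) k (by simpa using hk)

-- pm-table lookup at index a-1 equals the running max A carries at loop counter a
theorem pm_lookup (g0 : Int) (rest : List Int) (a : Nat) (ha : 1 ≤ a)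
    (han : a ≤ rest.length + 1) :
    (PySem.List.pyGet? (g0 :: pmTail g0 rest) ((a : Int) - 1)).getD 0 = rmax g0 rest (a - 1) := by
  obtain ⟨b, rb⟩ : ∃ b, a = b + 1 := ⟨a - 1, by omega⟩
  subst rb
  simp only [Nat.cast_add, Nat.cast_one]
  rw [show ((b : Int) + 1 - 1) = ((b : Nat) : Int) from by ring, PySem.List.pyGet?_natCast]
  simp only [Nat.add_sub_cancel]
  cases b with
  | zero => simp [rmax]
  | succ k =>
      have hk : k < rest.length := by omega
      simp only [List.getElem?_cons_succ, pmTail_getElem? rest g0 k hk]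
      simp

-- main invariant: collecting with the running max = filtering against the pm table
theorem collect_eq_filter (g0 : Int) (rest : List Int) :
    ∀ (t : Nat) (a : Nat), 1 ≤ a → (rest.length + 1) - a ≤ t →
    collect (g0 :: rest) (rmax g0 rest (a - 1)) (PySem.List.pyRange (a : Int) ((g0 :: rest).length : Int) 1) =
      (PySem.List.pyRange (a : Int) ((g0 :: rest).length : Int) 1).filter
        (fun i => decide ((PySem.List.pyGet? (g0 :: pmTail g0 rest) (i - 1)).getD 0 <
                          (PySem.List.pyGet? (g0 :: rest) i).getD 0)) := by
  intro t
  induction t with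
  | zero =>
      intro a ha hle
      have hnil : PySem.List.pyRange (a : Int) ((g0 :: rest).length : Int) 1 = [] := by
        apply PySem.List.pyRange_one_eq_nil
        simp only [List.length_cons]
        push_cast; omega
      rw [hnil]; simp [collect]
  | succ t ih =>
      intro a ha hle
      by_cases hlt : a < rest.length + 1
      · have hcons : PySem.List.pyRange (a : Int) ((g0 :: rest).length : Int) 1
            = (a : Int) :: PySem.List.pyRange ((a : Int) + 1) ((g0 :: rest).length : Int) 1 := by
          apply PySem.List.pyRange_one_cons
          simp only [List.length_cons]; push_cast; omega
        have hga : (PySem.List.pyGet? (g0 :: rest) (a : Int)).getD 0 = rest[a - 1]! := by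
          rw [PySem.List.pyGet?_natCast]
          obtain ⟨b, rb⟩ : ∃ b, a = b + 1 := ⟨a - 1, by omega⟩
          subst rb
          have hb : b < rest.length := by omega
          simp [List.getElem!_eq_getElem?_getD,
            List.getElem?_eq_getElem hb]
        have hmax : max (rmax g0 rest (a - 1)) rest[a - 1]! = rmax g0 rest a := by
          obtain ⟨b, rb⟩ : ∃ b, a = b + 1 := ⟨a - 1, by omega⟩
          subst rb
          rw [rmax_succ rest g0 b (by omega)]
          simp
        have hpm := pm_lookup g0 rest a ha (by omega)
        have hcast : ((a : Int) + 1) = (((a + 1 : Nat)) : Int) := by push_cast; ring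
        have ih' := ih (a + 1) (by omega) (by omega)
        simp only [Nat.add_sub_cancel] at ih'
        rw [hcons]
        simp only [collect, List.filter_cons, hga, hpm]
        rw [hmax, hcast, ih']
        by_cases hc : rmax g0 rest (a - 1) < rest[a - 1]!
        · rw [if_pos hc, if_pos (decide_eq_true hc)]
          simp
        · rw [if_neg hc, if_neg (fun h => hc (of_decide_eq_true h))]
          simp
      · have hnil : PySem.List.pyRange (a : Int) ((g0 :: rest).length : Int) 1 = [] := by
          apply PySem.List.pyRange_one_eq_nil
          simp only [List.length_cons]; push_cast; omega
        rw [hnil]; simp [collect]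

theorem head_pyGet? (g0 : Int) (rest : List Int) :
    PySem.List.pyGet? (g0 :: rest) 0 = some g0 := by
  simp

-- ===== VERDICT (by name: the statement is the Claim_ definition above) =====
theorem visible_trees_in_line_spec : Claim_equal_visible_trees_in_line := by
  intro grid _ hpre
  unfold Spec_visible_trees_in_line
  obtain ⟨g0, rest, rfl⟩ : ∃ g0 rest, grid = g0 :: rest := by
    cases grid with
    | nil => exact absurd rfl hpre
    | cons x xs => exact ⟨x, xs, rfl⟩
  unfold visible_trees_in_line visible_trees_in_line_alt
  rw [head_pyGet?]
  simp only
  rw [foldA_eq_collect]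
  rw [show PySem.List.slice (g0 :: rest) (some 1) none = rest from by
        rw [PySem.List.slice_from_one]; rfl]
  rw [show ([g0] : List Int) = [] ++ [g0] from rfl, foldB_eq_pmTail rest [] g0]
  simp only [List.nil_append, List.singleton_append]
  have h1 := collect_eq_filter g0 rest (rest.length + 1) 1 le_rfl (by omega)
  simp only [Nat.sub_self] at h1
  rw [show ((1:Nat) : Int) = (1 : Int) from rfl] at h1
  rw [show rmax g0 rest 0 = g0 from by cases rest <;> rfl] at h1
  rw [h1]
  rfl
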